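-- pv_equiv track=rewrite | github.com/adimis-ai/ciri-cli | src/toolkit/skill_manager_tools.py | _parse_description_from_content
-- ===== SOURCE A (Python) =====
-- def _parse_description_from_content(content: str) -> str:
--     """Extract description from skill content if not provided separately."""
--     lines = content.strip().split('\n')
--     for line in lines:
--         if line.strip().startswith('#'):
--             # Extract title/description from first header
--             return line.strip().lstrip('# ').strip()
--
--     # Fall back to first non-empty line
--     for line in lines:
--         if line.strip():
--             return line.strip()[:100] + ("..." if len(line.strip()) > 100 else "")
--
--     return "No description available"
-- ===== SOURCE B (Python) =====
-- def _parse_description_from_content(content: str) -> str: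
--     """Single pass: return on the first header line, remember the first non-empty line."""
--     first_nonempty = None
--     for line in content.strip().split('\n'):
--         s = line.strip()
--         if s.startswith('#'):
--             return s.lstrip('# ').strip()
--         if first_nonempty is None and s:
--             first_nonempty = s
--     if first_nonempty is not None:
--         return first_nonempty[:100] + ("..." if len(first_nonempty) > 100 else "")
--     return "No description available"
-- ===== Notes on version B (the rewrite author's own statement) =====
-- stated objective: simpler
-- what changed: Replaces A's two sequential scans over the lines (one for a header, one for the first non-empty line) by a single stateful scan that returns immediately on a header and remembers the first non-empty line for the fallback.
import Mathlib
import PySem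

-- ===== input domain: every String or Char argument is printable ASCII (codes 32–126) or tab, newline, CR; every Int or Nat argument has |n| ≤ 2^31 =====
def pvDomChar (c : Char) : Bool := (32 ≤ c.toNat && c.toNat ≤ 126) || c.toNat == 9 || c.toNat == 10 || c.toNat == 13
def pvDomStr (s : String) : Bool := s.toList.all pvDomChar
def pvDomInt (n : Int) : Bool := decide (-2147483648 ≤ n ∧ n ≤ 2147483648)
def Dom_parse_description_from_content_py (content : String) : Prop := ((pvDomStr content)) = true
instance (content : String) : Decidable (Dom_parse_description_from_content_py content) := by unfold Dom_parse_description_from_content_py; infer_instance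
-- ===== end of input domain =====

-- B merges A's two sequential scans of the lines into one stateful scan (objective: simpler).

-- ===== PORT A =====
-- hand port of s.lstrip('# '): drop leading characters belonging to the set {'#', ' '} — exact
def pvLstripHashSpace (s : List Char) : List Char :=
  s.dropWhile (fun c => c == '#' || c == ' ')

-- first for-loop of A: return on the first line whose strip starts with '#'
def pvAHeaderLoop : List (List Char) → Option (List Char)
  | [] => none
  | l :: rest =>
    if PySem.Chars.startswith (PySem.Chars.strip l) ['#'] then
      some (PySem.Chars.strip (pvLstripHashSpace (PySem.Chars.strip l)))
    else pvAHeaderLoop rest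

-- second for-loop of A: return the (truncated) first non-empty stripped line
def pvAFallbackLoop : List (List Char) → Option (List Char)
  | [] => none
  | l :: rest =>
    if PySem.Chars.strip l ≠ [] then
      some (PySem.Chars.slice (PySem.Chars.strip l) none (some 100) ++
            (if 100 < PySem.Chars.len (PySem.Chars.strip l) then "...".toList else []))
    else pvAFallbackLoop rest

def parse_description_from_content_py (content : String) : String :=
  let lines := PySem.Chars.splitOn (PySem.Chars.strip content.toList) ['\n']
  match pvAHeaderLoop lines with
  | some r => String.mk r
  | none =>
    match pvAFallbackLoop lines with
    | some r => String.mk r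
    | none => "No description available"

-- ===== PORT B =====
-- single pass: immediate return on a header line, first non-empty stripped line carried as state
def pvBLoop : List (List Char) → Option (List Char) → List Char
  | [], none => "No description available".toList
  | [], some f =>
    PySem.Chars.slice f none (some 100) ++ (if 100 < PySem.Chars.len f then "...".toList else [])
  | l :: rest, acc =>
    let s := PySem.Chars.strip l
    if PySem.Chars.startswith s ['#'] then
      PySem.Chars.strip (s.dropWhile (fun c => c == '#' || c == ' '))
    else
      pvBLoop rest (if acc.isNone && s ≠ [] then some s else acc)

def parse_description_from_content_py_alt (content : String) : String :=
  String.mk (pvBLoop (PySem.Chars.splitOn (PySem.Chars.strip content.toList) ['\n']) none)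

-- ===== PRECONDITION & SPEC =====
def Spec_parse_description_from_content_py (content : String) (out : String) : Prop := out = parse_description_from_content_py_alt content
instance (content : String) (out : String) : Decidable (Spec_parse_description_from_content_py content out) := by unfold Spec_parse_description_from_content_py; infer_instance

-- ===== CLAIM (what is proved, stated in full; the proofs are below) =====
def Claim_equal_parse_description_from_content_py : Prop := ∀ (content : String), Dom_parse_description_from_content_py content → Spec_parse_description_from_content_py content (parse_description_from_content_py content)

-- ===== LEMMAS AND PROOFS =====

-- bridging invariant: the single-pass loop with state acc equals A's two-loop composition
theorem pvBLoop_invariant (lines : List (List Char)) (acc : Option (List Char)) :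
    pvBLoop lines acc =
      match pvAHeaderLoop lines with
      | some r => r
      | none =>
        match acc with
        | some f => PySem.Chars.slice f none (some 100) ++
            (if 100 < PySem.Chars.len f then "...".toList else [])
        | none =>
          match pvAFallbackLoop lines with
          | some r => r
          | none => "No description available".toList := by
  induction lines generalizing acc with
  | nil => cases acc <;> simp [pvBLoop, pvAHeaderLoop, pvAFallbackLoop]
  | cons l rest ih =>
    simp only [pvBLoop, pvAHeaderLoop, pvAFallbackLoop, pvLstripHashSpace]
    by_cases hh : PySem.Chars.startswith (PySem.Chars.strip l) ['#'] = true
    · simp [hh]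
    · simp only [hh, if_false]
      rw [ih]
      cases acc with
      | some f => simp
      | none =>
        by_cases hs : PySem.Chars.strip l = [] <;> simp [hs]

theorem parse_description_from_content_py_equal (content : String) :
    parse_description_from_content_py content = parse_description_from_content_py_alt content := by
  unfold parse_description_from_content_py parse_description_from_content_py_alt
  rw [pvBLoop_invariant]
  cases hA : pvAHeaderLoop (PySem.Chars.splitOn (PySem.Chars.strip content.toList) ['\n']) with
  | some r => simp [hA]
  | none =>
    cases hF : pvAFallbackLoop (PySem.Chars.splitOn (PySem.Chars.strip content.toList) ['\n']) with
    | some r => simp [hA, hF]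
    | none => simp [hA, hF]; rfl

-- ===== VERDICT (by name: the statement is the Claim_ definition above) =====
theorem parse_description_from_content_py_spec : Claim_equal_parse_description_from_content_py := by
  intro content _
  exact (parse_description_from_content_py_equal content).symm ▸ rfl
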